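-- pv_equiv track=rewrite | github.com/micheloosterhof/aldegonde | lp.py | decrypt_p_plus_cp
-- ===== SOURCE A (Python) =====
-- N = 29  # GF(29)
--
-- def decrypt_p_plus_cp(C: list[int], primer_c: int, primer_p: int) -> list[int]:
--     """C(i) = P(i) + C(i-1)*P(i-1)  =>  P(i) = C(i) - C(i-1)*P(i-1)"""
--     P = []
--     prev_c = primer_c
--     prev_p = primer_p
--     for c in C:
--         p = (c - prev_c * prev_p) % N
--         P.append(p)
--         prev_c = c
--         prev_p = p
--     return P
-- ===== SOURCE B (Python) =====
-- N = 29  # GF(29)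
--
-- def decrypt_p_plus_cp(C: list[int], primer_c: int, primer_p: int) -> list[int]:
--     """C(i) = P(i) + C(i-1)*P(i-1)  =>  P(i) = C(i) - C(i-1)*P(i-1).
--
--     Each step is the affine map P(i) = -C(i-1)*P(i-1) + C(i) over GF(29), whose
--     coefficients depend on C only.  Stage 1 composes these maps cumulatively into
--     pairs (a_i, b_i) with P(i) = a_i*primer_p + b_i, never touching the seed;
--     stage 2 applies every composed map to primer_p."""
--     prevs = [primer_c] + C[:-1]
--     coeffs = []
--     a, b = 1, 0
--     for pc, c in zip(prevs, C):
--         a, b = (-pc * a) % N, (c - pc * b) % N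
--         coeffs.append((a, b))
--     return [(a * primer_p + b) % N for a, b in coeffs]
-- ===== Notes on version B (the rewrite author's own statement) =====
-- stated objective: alternative
-- what changed: Instead of threading the decrypted value through one stateful recurrence, B composes the per-position affine maps P(i) = -C(i-1)*P(i-1) + C(i) (whose coefficients depend on C alone) into cumulative (a_i, b_i) pairs in a first pass, then applies every composed map to the seed primer_p in a second pass.
import Mathlib
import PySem

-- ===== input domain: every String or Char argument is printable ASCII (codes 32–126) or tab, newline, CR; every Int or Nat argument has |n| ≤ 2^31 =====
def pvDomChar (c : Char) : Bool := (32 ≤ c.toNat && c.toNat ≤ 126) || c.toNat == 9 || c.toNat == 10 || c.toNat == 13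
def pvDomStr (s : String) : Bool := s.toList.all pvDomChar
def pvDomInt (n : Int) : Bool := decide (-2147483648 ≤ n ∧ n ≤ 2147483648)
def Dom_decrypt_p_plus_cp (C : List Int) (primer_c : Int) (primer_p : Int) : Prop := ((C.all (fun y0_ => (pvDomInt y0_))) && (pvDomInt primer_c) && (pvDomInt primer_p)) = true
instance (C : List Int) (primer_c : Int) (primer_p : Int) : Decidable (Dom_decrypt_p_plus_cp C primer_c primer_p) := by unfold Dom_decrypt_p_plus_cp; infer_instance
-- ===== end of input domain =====

-- B composes the per-step affine maps (coefficients from C only) and applies them to the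
-- seed in a second pass, instead of A's stateful value recurrence; objective: alternative.

-- ===== PORT A =====
-- literal port of A's for-loop: state (P, prev_c, prev_p), appending each p
def decrypt_p_plus_cp (C : List Int) (primer_c : Int) (primer_p : Int) : List Int :=
  (C.foldl (fun (s : List Int × Int × Int) c =>
      let p := PySem.Int.mod (c - s.2.1 * s.2.2) 29
      (s.1 ++ [p], c, p)) ([], primer_c, primer_p)).1

-- ===== PORT B =====
-- stage 1: fold over zip([primer_c] + C[:-1], C) composing affine coefficient pairs
def decrypt_p_plus_cp_alt (C : List Int) (primer_c : Int) (primer_p : Int) : List Int :=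
  let prevs := primer_c :: C.dropLast
  let coeffs := ((prevs.zip C).foldl (fun (s : List (Int × Int) × Int × Int) pcc =>
      let a := PySem.Int.mod (-pcc.1 * s.2.1) 29
      let b := PySem.Int.mod (pcc.2 - pcc.1 * s.2.2) 29
      (s.1 ++ [(a, b)], a, b)) ([], 1, 0)).1
  -- stage 2: apply each composed map to the seed
  coeffs.map (fun q => PySem.Int.mod (q.1 * primer_p + q.2) 29)

-- ===== PRECONDITION & SPEC =====
def Spec_decrypt_p_plus_cp (C : List Int) (primer_c : Int) (primer_p : Int) (out : List Int) : Prop := out = decrypt_p_plus_cp_alt C primer_c primer_p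
instance (C : List Int) (primer_c : Int) (primer_p : Int) (out : List Int) : Decidable (Spec_decrypt_p_plus_cp C primer_c primer_p out) := by unfold Spec_decrypt_p_plus_cp; infer_instance

-- ===== CLAIM (what is proved, stated in full; the proofs are below) =====
def Claim_equal_decrypt_p_plus_cp : Prop := ∀ (C : List Int) (primer_c : Int) (primer_p : Int), Dom_decrypt_p_plus_cp C primer_c primer_p → Spec_decrypt_p_plus_cp C primer_c primer_p (decrypt_p_plus_cp C primer_c primer_p)

-- ===== LEMMAS AND PROOFS =====

-- common reference: the plain recurrence as structural recursion
def pvSpecRun : List Int → Int → Int → List Int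
  | [], _, _ => []
  | c :: rest, pc, pv =>
    let p := PySem.Int.mod (c - pc * pv) 29
    p :: pvSpecRun rest c p

lemma pvA_eq (C : List Int) : ∀ (pc pv : Int) (acc : List Int),
    (C.foldl (fun (s : List Int × Int × Int) c =>
      let p := PySem.Int.mod (c - s.2.1 * s.2.2) 29
      (s.1 ++ [p], c, p)) (acc, pc, pv)).1 = acc ++ pvSpecRun C pc pv := by
  induction C with
  | nil => intro pc pv acc; simp [pvSpecRun]
  | cons c rest ih =>
    intro pc pv acc
    simp only [List.foldl, pvSpecRun]
    rw [ih]
    simp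

lemma pvZip_cons (pc c : Int) (rest : List Int) :
    (pc :: (c :: rest).dropLast).zip (c :: rest)
      = (pc, c) :: (c :: rest.dropLast).zip rest := by
  cases rest <;> simp

lemma pvB_eq (C : List Int) : ∀ (pc a b pp pv : Int) (acc : List (Int × Int)),
    pv % 29 = (a * pp + b) % 29 →
    ((((pc :: C.dropLast).zip C).foldl (fun (s : List (Int × Int) × Int × Int) pcc =>
        let a := PySem.Int.mod (-pcc.1 * s.2.1) 29
        let b := PySem.Int.mod (pcc.2 - pcc.1 * s.2.2) 29
        (s.1 ++ [(a, b)], a, b)) (acc, a, b)).1).map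
          (fun q => PySem.Int.mod (q.1 * pp + q.2) 29)
      = acc.map (fun q => PySem.Int.mod (q.1 * pp + q.2) 29) ++ pvSpecRun C pc pv := by
  induction C with
  | nil => intro pc a b pp pv acc _; simp [pvSpecRun]
  | cons c rest ih =>
    intro pc a b pp pv acc hinv
    have hmod : ∀ x : Int, PySem.Int.mod x 29 = x % 29 :=
      fun x => PySem.Int.mod_eq_emod_of_pos (by norm_num)
    -- the composed coefficients agree with the value recurrence, modulo 29
    have h1 : ((-pc * a) % 29 * pp + (c - pc * b) % 29) % 29 = (c - pc * pv) % 29 := by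
      have ha : (-pc * a) % 29 * pp ≡ (-pc * a) * pp [ZMOD 29] :=
        Int.ModEq.mul_right pp (Int.emod_emod_of_dvd (-pc * a) dvd_rfl : (-pc * a) % 29 % 29 = _)
      have hb : (c - pc * b) % 29 ≡ c - pc * b [ZMOD 29] :=
        (Int.emod_emod_of_dvd (c - pc * b) dvd_rfl : (c - pc * b) % 29 % 29 = _)
      have hpv : a * pp + b ≡ pv [ZMOD 29] := (hinv.symm : _)
      have hcomb : (-pc * a) * pp + (c - pc * b) ≡ c - pc * pv [ZMOD 29] := by
        have : (-pc * a) * pp + (c - pc * b) = c - pc * (a * pp + b) := by ring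
        rw [this]
        exact (Int.ModEq.refl c).sub (hpv.mul_left pc)
      exact ((ha.add hb).trans hcomb : _)
    rw [pvZip_cons]
    simp only [List.foldl_cons]
    rw [ih c (PySem.Int.mod (-pc * a) 29) (PySem.Int.mod (c - pc * b) 29) pp
        (PySem.Int.mod (c - pc * pv) 29) (acc ++ [(_, _)]) ?hinv']
    case hinv' =>
      simp only [hmod]
      rw [Int.emod_emod_of_dvd _ dvd_rfl]
      exact h1.symm
    simp only [pvSpecRun, List.map_append, List.map_cons, List.map_nil, List.append_assoc,
      List.cons_append, List.nil_append]
    congr 2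
    simp only [hmod]
    exact h1

-- ===== VERDICT (by name: the statement is the Claim_ definition above) =====
theorem decrypt_p_plus_cp_spec : Claim_equal_decrypt_p_plus_cp := by
  intro C pc pp _
  unfold Spec_decrypt_p_plus_cp decrypt_p_plus_cp decrypt_p_plus_cp_alt
  rw [pvA_eq, pvB_eq C pc 1 0 pp pp [] (by ring_nf)]
  simp
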